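-- pv_equiv track=rewrite | github.com/markybuilds/NBA-Playoffs | nba_odds/parlay_generator.py | is_valid_no_sweat_combo
-- ===== SOURCE A (Python) =====
-- def is_valid_no_sweat_combo(combo):
--     # No duplicate player for the same stat type (e.g., rebounds/alt rebounds)
--     player_market = set()
--     for leg in combo:
--         # Normalize market to stat type (e.g., 'rebounds' for both 'player_rebounds' and 'player_rebounds_alternate')
--         stat_type = leg['market_key'].replace('_alternate', '')
--         key = (leg['player_name'], stat_type)
--         if key in player_market:
--             return False
--         player_market.add(key)
--     return True
-- ===== SOURCE B (Python) =====
-- def is_valid_no_sweat_combo(combo):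
--     # Sort the normalized (player, stat) keys, then reject any adjacent equal pair.
--     keys = [(leg['player_name'], leg['market_key'].replace('_alternate', '')) for leg in combo]
--     keys.sort()
--     return all(a != b for a, b in zip(keys, keys[1:]))
-- ===== Notes on version B (the rewrite author's own statement) =====
-- stated objective: alternative
-- what changed: Replaces A's incrementally grown set with early exit by building the full key list, sorting it, and scanning once for adjacent equal keys.
import Mathlib
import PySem

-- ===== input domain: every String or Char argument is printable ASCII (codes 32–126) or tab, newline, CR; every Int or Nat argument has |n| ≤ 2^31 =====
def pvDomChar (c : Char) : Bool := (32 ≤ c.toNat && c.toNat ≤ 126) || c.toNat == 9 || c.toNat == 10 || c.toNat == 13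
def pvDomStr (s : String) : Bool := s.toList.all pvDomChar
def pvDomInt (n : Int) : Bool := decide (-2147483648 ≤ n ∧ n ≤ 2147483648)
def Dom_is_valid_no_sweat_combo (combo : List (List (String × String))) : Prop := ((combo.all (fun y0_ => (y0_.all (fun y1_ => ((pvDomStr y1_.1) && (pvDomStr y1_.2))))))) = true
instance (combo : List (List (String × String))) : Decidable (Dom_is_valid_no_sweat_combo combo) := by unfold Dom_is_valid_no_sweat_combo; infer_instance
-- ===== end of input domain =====

-- B replaces A's growing membership set (early exit) by sort-then-scan for adjacent duplicates; return-value equivalence only.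

-- ===== PORT A =====
-- leg['k'] is ported as (Dict.mk leg).getD "k" "" — exact under Pre_, which guarantees the key is present.
def is_valid_no_sweat_combo_go (legs : List (List (String × String)))
    (player_market : PySem.Set (String × String)) : Bool :=
  match legs with
  | [] => true
  | leg :: rest =>
    let stat_type := PySem.Str.replace ((PySem.Dict.mk leg).getD "market_key" "") "_alternate" ""
    let key := ((PySem.Dict.mk leg).getD "player_name" "", stat_type)
    if PySem.Set.contains player_market key then false
    else is_valid_no_sweat_combo_go rest (PySem.Set.add player_market key)

def is_valid_no_sweat_combo (combo : List (List (String × String))) : Bool :=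
  is_valid_no_sweat_combo_go combo PySem.Set.empty

-- ===== PORT B =====
def is_valid_no_sweat_combo_alt (combo : List (List (String × String))) : Bool :=
  let keys := combo.map (fun leg =>
    ((PySem.Dict.mk leg).getD "player_name" "",
     PySem.Str.replace ((PySem.Dict.mk leg).getD "market_key" "") "_alternate" ""))
  let ks := PySem.List.sorted2 keys Prod.fst Prod.snd   -- keys.sort(): Python tuple (lex) order
  (ks.zip ks.tail).all (fun p => decide (p.1 ≠ p.2))

-- ===== PRECONDITION & SPEC =====
-- Pre_ excludes exactly the legs missing key 'player_name' or 'market_key', on which A raises KeyError.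
def Pre_is_valid_no_sweat_combo (combo : List (List (String × String))) : Prop :=
  ∀ leg ∈ combo, (PySem.Dict.mk leg).contains "player_name" = true ∧
                 (PySem.Dict.mk leg).contains "market_key" = true
instance (combo : List (List (String × String))) : Decidable (Pre_is_valid_no_sweat_combo combo) := by
  unfold Pre_is_valid_no_sweat_combo; infer_instance
def pvWitness_is_valid_no_sweat_combo : (List (List (String × String))) :=
  [[("player_name", "x"), ("market_key", "player_rebounds")]]
def Spec_is_valid_no_sweat_combo (combo : List (List (String × String))) (out : Bool) : Prop := out = is_valid_no_sweat_combo_alt combo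
instance (combo : List (List (String × String))) (out : Bool) : Decidable (Spec_is_valid_no_sweat_combo combo out) := by unfold Spec_is_valid_no_sweat_combo; infer_instance

-- ===== CLAIM (what is proved, stated in full; the proofs are below) =====
def Claim_equal_is_valid_no_sweat_combo : Prop := ∀ (combo : List (List (String × String))), Dom_is_valid_no_sweat_combo combo → Pre_is_valid_no_sweat_combo combo → Spec_is_valid_no_sweat_combo combo (is_valid_no_sweat_combo combo)

-- ===== LEMMAS AND PROOFS =====

-- the strict lex comparison sorted2 uses
def pvKlt (a b : String × String) : Bool :=
  decide (a.1 < b.1) || (!decide (b.1 < a.1) && decide (a.2 < b.2))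

lemma pvKlt_asymm {a b : String × String} (h : pvKlt a b = true) : pvKlt b a = false := by
  unfold pvKlt at *
  simp only [Bool.or_eq_true, Bool.and_eq_true, Bool.not_eq_true', decide_eq_true_eq,
    decide_eq_false_iff_not] at h
  simp only [Bool.or_eq_false_iff, Bool.and_eq_false_iff, Bool.not_eq_false',
    decide_eq_true_eq, decide_eq_false_iff_not]
  rcases h with h | ⟨h1, h2⟩
  · exact ⟨asymm h, Or.inl h⟩
  · exact ⟨h1, Or.inr (asymm h2)⟩
lemma pvKlt_trans {a b c : String × String} (h1 : pvKlt a b = true) (h2 : pvKlt b c = true) :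
    pvKlt a c = true := by
  unfold pvKlt at *
  simp only [Bool.or_eq_true, Bool.and_eq_true, Bool.not_eq_true', decide_eq_true_eq,
    decide_eq_false_iff_not] at *
  rcases h1 with hA | ⟨hA, hA'⟩ <;> rcases h2 with hB | ⟨hB, hB'⟩
  · exact Or.inl (lt_trans hA hB)
  · exact Or.inl (lt_of_lt_of_le hA (not_lt.mp hB))
  · exact Or.inl (lt_of_le_of_lt (not_lt.mp hA) hB)
  · exact Or.inr ⟨not_lt.mpr (le_trans (not_lt.mp hA) (not_lt.mp hB)), lt_trans hA' hB'⟩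
lemma pvKlt_total {a b : String × String} (h1 : pvKlt a b = false) (h2 : pvKlt b a = false) :
    a = b := by
  unfold pvKlt at *
  simp only [Bool.or_eq_false_iff, Bool.and_eq_false_iff, Bool.not_eq_false',
    decide_eq_true_eq, decide_eq_false_iff_not] at h1 h2
  obtain ⟨ha, hb⟩ := h1
  obtain ⟨ha', hb'⟩ := h2
  have e1 : a.1 = b.1 := le_antisymm (not_lt.mp ha') (not_lt.mp ha)
  have e2 : a.2 = b.2 := by
    rcases hb with h | h
    · exact absurd e1.le (not_le.mpr h)
    · rcases hb' with h' | h'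
      · exact absurd e1.ge (not_le.mpr h')
      · exact le_antisymm (not_lt.mp h') (not_lt.mp h)
  exact Prod.ext e1 e2

-- le relation: kle a b means "not b < a"
def pvKle (a b : String × String) : Prop := pvKlt b a = false

lemma pvInsertBy_pairwise (x : String × String) (l : List (String × String))
    (hl : l.Pairwise pvKle) :
    (PySem.List.insertBy (fun a b => pvKlt a b) x l).Pairwise pvKle := by
  induction l with
  | nil => simp [PySem.List.insertBy]
  | cons y ys ih =>
    rw [List.pairwise_cons] at hl
    obtain ⟨hy, hys⟩ := hl
    simp only [PySem.List.insertBy]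
    split_ifs with h
    · refine List.Pairwise.cons ?_ (List.Pairwise.cons hy hys)
      intro z hz
      rcases List.mem_cons.mp hz with rfl | hz
      · exact pvKlt_asymm h
      · -- pvKle x z : pvKlt z x = false; if true, pvKlt z y true via trans with h, contra hy z
        cases e : pvKlt z x with
        | false => exact e
        | true =>
          have hzy : pvKle y z := hy z hz
          unfold pvKle at hzy
          rw [pvKlt_trans e h] at hzy
          cases hzy
    · simp only [Bool.not_eq_true] at h
      refine List.Pairwise.cons ?_ (ih hys)
      intro z hz
      rcases (PySem.List.mem_insertBy (before := fun a b => pvKlt a b) (x := x) (ys := ys) (y := z)).mp hz with rfl | hz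
      · exact h
      · exact hy z hz
lemma pvSorted2_pairwise (keys : List (String × String)) :
    (PySem.List.sorted2 keys Prod.fst Prod.snd).Pairwise pvKle := by
  show (List.foldl (fun acc x => PySem.List.insertBy _ x acc) [] keys).Pairwise pvKle
  have : ∀ (ks : List (String × String)) (acc : List (String × String)),
      acc.Pairwise pvKle →
      (List.foldl (fun acc x => PySem.List.insertBy (fun a b => pvKlt a b) x acc) acc ks).Pairwise pvKle := by
    intro ks
    induction ks with
    | nil => intro acc h; simpa using h
    | cons k kt ih =>
      intro acc h
      exact ih _ (pvInsertBy_pairwise k acc h)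
  exact this keys [] List.Pairwise.nil

-- adjacent-scan on a pvKle-sorted list decides Nodup
lemma pvScan_eq_nodup (l : List (String × String)) (hl : l.Pairwise pvKle) :
    ((l.zip l.tail).all (fun p => decide (p.1 ≠ p.2)) = true) ↔ l.Nodup := by
  induction l with
  | nil => simp
  | cons a t ih =>
    cases t with
    | nil => simp
    | cons b t' =>
      rw [List.pairwise_cons] at hl
      obtain ⟨ha, ht⟩ := hl
      simp only [List.tail_cons, List.zip_cons_cons, List.all_cons, Bool.and_eq_true,
        decide_eq_true_eq]
      constructor
      · rintro ⟨hab, hrest⟩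
        have hnd := (ih ht).mp hrest
        refine List.nodup_cons.mpr ⟨?_, hnd⟩
        -- a ∉ b :: t' : a ≠ b, and for z ∈ t', pvKlt a b holds strictly so a ≠ z
        have hab' : pvKlt a b = true := by
          cases e : pvKlt a b with
          | true => rfl
          | false => exact absurd (pvKlt_total e (ha b (by simp))) hab
        intro hmem
        rcases List.mem_cons.mp hmem with rfl | hmem
        · exact hab rfl
        · -- a ∈ t'; from ht: pvKle b a, i.e. pvKlt a b = false — contradiction
          rw [List.pairwise_cons] at ht
          exact absurd hab' (by simpa [pvKle] using ht.1 a hmem)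
      · intro hnd
        rw [List.nodup_cons] at hnd
        refine ⟨fun e => hnd.1 (e ▸ List.mem_cons_self ..), (ih ht).mpr hnd.2⟩

-- the key of one leg
def pvKey (leg : List (String × String)) : String × String :=
  ((PySem.Dict.mk leg).getD "player_name" "",
   PySem.Str.replace ((PySem.Dict.mk leg).getD "market_key" "") "_alternate" "")

-- A's loop decides Nodup of seen ++ remaining keys
lemma pvGo_eq_nodup (legs : List (List (String × String)))
    (s : PySem.Set (String × String)) (hs : s.Nodup) :
    (is_valid_no_sweat_combo_go legs s = true) ↔ (s ++ legs.map pvKey).Nodup := by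
  induction legs generalizing s with
  | nil => simpa [is_valid_no_sweat_combo_go] using hs
  | cons leg rest ih =>
    simp only [is_valid_no_sweat_combo_go, List.map_cons]
    by_cases hmem : pvKey leg ∈ s
    · have hc : PySem.Set.contains s (pvKey leg) = true :=
        (PySem.Set.contains_iff _ _).mpr hmem
      simp only [pvKey] at hc
      rw [hc]
      simp only [if_true]
      constructor
      · intro h; exact absurd h (by simp)
      · intro h
        exfalso
        exact List.disjoint_of_nodup_append h hmem (List.mem_cons_self ..)
    · have hc : PySem.Set.contains s (pvKey leg) = false := by
        cases e : PySem.Set.contains s (pvKey leg) with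
        | false => rfl
        | true => exact absurd ((PySem.Set.contains_iff _ _).mp e) hmem
      simp only [pvKey] at hc
      rw [hc]
      simp only [if_false, Bool.false_eq_true]
      have hadd : PySem.Set.add s (pvKey leg) = s ++ [pvKey leg] :=
        PySem.Set.add_of_not_mem hmem
      have hadd' : (PySem.Set.add s (pvKey leg)).Nodup := by
        rw [hadd]
        exact List.Nodup.append hs (List.nodup_singleton _) (List.disjoint_singleton.mpr hmem)
      have := ih (PySem.Set.add s (pvKey leg)) hadd'
      rw [show (PySem.Set.add s
          ((PySem.Dict.mk leg).getD "player_name" "",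
            PySem.Str.replace ((PySem.Dict.mk leg).getD "market_key" "") "_alternate" "")) =
          PySem.Set.add s (pvKey leg) from rfl] at *
      rw [this, hadd, List.append_assoc, List.singleton_append]

-- ===== VERDICT (by name: the statement is the Claim_ definition above) =====
theorem is_valid_no_sweat_combo_spec : Claim_equal_is_valid_no_sweat_combo := by
  intro combo _ _
  show is_valid_no_sweat_combo combo = is_valid_no_sweat_combo_alt combo
  have hA : (is_valid_no_sweat_combo combo = true) ↔ (combo.map pvKey).Nodup := by
    have := pvGo_eq_nodup combo PySem.Set.empty (by simp [PySem.Set.empty])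
    simpa [is_valid_no_sweat_combo, PySem.Set.empty] using this
  have hperm : (PySem.List.sorted2 (combo.map pvKey) Prod.fst Prod.snd).Perm (combo.map pvKey) :=
    PySem.List.sorted2_perm ..
  have hB : (is_valid_no_sweat_combo_alt combo = true) ↔ (combo.map pvKey).Nodup := by
    unfold is_valid_no_sweat_combo_alt
    rw [show (combo.map (fun leg =>
      ((PySem.Dict.mk leg).getD "player_name" "",
       PySem.Str.replace ((PySem.Dict.mk leg).getD "market_key" "") "_alternate" ""))) =
      combo.map pvKey from rfl]
    rw [pvScan_eq_nodup _ (pvSorted2_pairwise _)]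
    exact hperm.nodup_iff
  cases e : is_valid_no_sweat_combo_alt combo with
  | true => exact hA.mpr (hB.mp e)
  | false =>
    cases e2 : is_valid_no_sweat_combo combo with
    | false => rfl
    | true => exact absurd (hB.mpr (hA.mp e2)) (by simp [e])
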